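-- pv_equiv track=rewrite | github.com/paperwork-labs/paperwork | apis/brain/app/services/cloudflare_client.py | apex_for_hostname
-- ===== SOURCE A (Python) =====
-- _KNOWN_APEXES: tuple[str, ...] = (
--     "paperworklabs.com",
--     "axiomfolio.com",
--     "filefree.ai",
--     "launchfree.ai",
--     "distill.tax",
-- )
--
-- def apex_for_hostname(hostname: str) -> str | None:
--     """Return the production apex zone for ``hostname``, or ``None`` if unknown.
--
--     Accepts either a bare apex (``paperworklabs.com``) or a subdomain
--     (``accounts.paperworklabs.com``).
--     """
--     host = hostname.strip().lower().rstrip(".")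
--     if not host:
--         return None
--     for apex in _KNOWN_APEXES:
--         if host == apex or host.endswith(f".{apex}"):
--             return apex
--     return None
-- ===== SOURCE B (Python) =====
-- _KNOWN_APEXES: tuple[str, ...] = (
--     "paperworklabs.com",
--     "axiomfolio.com",
--     "filefree.ai",
--     "launchfree.ai",
--     "distill.tax",
-- )
--
-- _APEX_SET = frozenset(_KNOWN_APEXES)
--
--
-- def apex_for_hostname(hostname: str) -> str | None:
--     """Return the production apex zone for ``hostname``, or ``None`` if unknown.
--
--     Walks the dot-separated suffixes of the host (longest first) and returns
--     the first one that is a known apex, using set membership instead of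
--     scanning the apex list with ``endswith``.
--     """
--     candidate = hostname.strip().lower().rstrip(".")
--     if not candidate:
--         return None
--     while True:
--         if candidate in _APEX_SET:
--             return candidate
--         i = candidate.find(".")
--         if i == -1:
--             return None
--         candidate = candidate[i + 1:]
-- ===== Notes on version B (the rewrite author's own statement) =====
-- stated objective: idiomatic
-- what changed: Instead of scanning the apex list with == / endswith for each apex, B normalizes the host once and walks its dot-separated suffixes longest-first, returning the first suffix found in a frozenset of the known apexes.
import Mathlib
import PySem

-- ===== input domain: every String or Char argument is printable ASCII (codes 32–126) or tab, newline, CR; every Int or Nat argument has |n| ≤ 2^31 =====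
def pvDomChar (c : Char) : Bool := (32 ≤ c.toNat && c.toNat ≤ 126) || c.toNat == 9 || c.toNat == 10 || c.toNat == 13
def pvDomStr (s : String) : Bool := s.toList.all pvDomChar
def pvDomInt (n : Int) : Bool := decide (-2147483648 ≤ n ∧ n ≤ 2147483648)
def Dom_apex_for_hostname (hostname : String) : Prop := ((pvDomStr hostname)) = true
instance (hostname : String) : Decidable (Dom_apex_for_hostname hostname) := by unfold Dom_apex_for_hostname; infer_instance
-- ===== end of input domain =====

-- B walks the host's dot-separated suffixes longest-first and looks each up in a set of the
-- known apexes, instead of A's scan over the apex list with == / endswith (objective: idiomatic).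

-- ===== PORT A =====
-- _KNOWN_APEXES
def pvKnownApexes : List String :=
  ["paperworklabs.com", "axiomfolio.com", "filefree.ai", "launchfree.ai", "distill.tax"]

-- hand port of str.rstrip("."): drops exactly the trailing '.' characters (exact: the
-- stripped-chars set is the single ASCII character '.')
def pvRstripDot (s : List Char) : List Char := (s.reverse.dropWhile (· == '.')).reverse

-- the 'for apex in _KNOWN_APEXES' loop of A
def pvLoopA (host : String) : List String → Option String
  | [] => none
  | apex :: rest =>
      if host == apex || PySem.Str.endswith host ("." ++ apex) then some apex
      else pvLoopA host rest

def apex_for_hostname (hostname : String) : Option String :=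
  let host := String.ofList (pvRstripDot (PySem.Str.lower (PySem.Str.strip hostname)).toList)
  if host == "" then none
  else pvLoopA host pvKnownApexes

-- ===== PORT B =====
-- _APEX_SET = frozenset(_KNOWN_APEXES)
def pvApexSet : PySem.Set String := PySem.Set.ofList pvKnownApexes

-- the 'while True' loop of B: candidate is the remaining suffix of the host
def pvScanB (c : List Char) : Option String :=
  if pvApexSet.contains (String.ofList c) then some (String.ofList c)
  else
    let i := PySem.Chars.find c ['.']
    if h : i = -1 then none
    else pvScanB (PySem.Chars.slice c (some (i + 1)) none)
termination_by c.length
decreasing_by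
  have hinf : ['.'] <:+: c := (PySem.Chars.find_ne_neg_one_iff c ['.']).1 h
  have hnn : (0:Int) ≤ PySem.Chars.find c ['.'] := (PySem.Chars.find_nonneg_iff c ['.']).2 hinf
  have hne : c ≠ [] := by rintro rfl; exact absurd (List.infix_nil.1 hinf) (by simp)
  rw [PySem.Chars.slice_eq_listSlice,
      PySem.List.slice_from c (by omega : (0:Int) ≤ PySem.Chars.find c ['.'] + 1)]
  have hlen : 0 < c.length := List.length_pos_iff.2 hne
  simp only [List.length_drop]
  omega

def apex_for_hostname_alt (hostname : String) : Option String :=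
  let host := String.ofList (pvRstripDot (PySem.Str.lower (PySem.Str.strip hostname)).toList)
  if host == "" then none
  else pvScanB host.toList

-- ===== PRECONDITION & SPEC =====
def Spec_apex_for_hostname (hostname : String) (out : Option String) : Prop := out = apex_for_hostname_alt hostname
instance (hostname : String) (out : Option String) : Decidable (Spec_apex_for_hostname hostname out) := by unfold Spec_apex_for_hostname; infer_instance

-- ===== CLAIM (what is proved, stated in full; the proofs are below) =====
def Claim_equal_apex_for_hostname : Prop := ∀ (hostname : String), Dom_apex_for_hostname hostname → Spec_apex_for_hostname hostname (apex_for_hostname hostname)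

-- ===== LEMMAS AND PROOFS =====

-- 'apex a matches host h': h == a or h ends with "." ++ a (over code-point lists)
def pvMatches (h a : List Char) : Prop := h = a ∨ ('.' :: a) <:+ h

-- A's loop condition decides pvMatches
theorem pvCond_iff (h : List Char) (a : String) :
    (String.ofList h == a || PySem.Str.endswith (String.ofList h) ("." ++ a)) = true
      ↔ pvMatches h a.toList := by
  have hdot : ("." : String).toList = ['.'] := by decide
  simp [pvMatches, String.ext_iff, String.toList_append, hdot, PySem.Chars.endswith_iff]

theorem pvLoopA_eq_none (h : List Char) (L : List String)
    (hno : ∀ a ∈ L, ¬ pvMatches h a.toList) : pvLoopA (String.ofList h) L = none := by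
  induction L with
  | nil => rfl
  | cons a rest ih =>
    have hc : ¬ ((String.ofList h == a || PySem.Str.endswith (String.ofList h) ("." ++ a)) = true) :=
      fun hcond => hno a (by simp) ((pvCond_iff h a).1 hcond)
    simp only [pvLoopA, if_neg hc]
    exact ih (fun b hb => hno b (List.mem_cons_of_mem _ hb))

theorem pvLoopA_eq_some (h : List Char) (L : List String) (a : String)
    (hmem : a ∈ L) (hm : pvMatches h a.toList)
    (huniq : ∀ b ∈ L, pvMatches h b.toList → b = a) :
    pvLoopA (String.ofList h) L = some a := by
  induction L with
  | nil => cases hmem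
  | cons b rest ih =>
    by_cases hc : (String.ofList h == b || PySem.Str.endswith (String.ofList h) ("." ++ b)) = true
    · have hb : b = a := huniq b (by simp) ((pvCond_iff h b).1 hc)
      simp only [pvLoopA]
      rw [if_pos hc, hb]
    · have hba : b ≠ a := fun e => hc ((pvCond_iff h b).2 (e ▸ hm))
      have hmem' : a ∈ rest := by
        rcases List.mem_cons.1 hmem with e | hr
        · exact absurd e.symm hba
        · exact hr
      simp only [pvLoopA, if_neg hc]
      exact ih hmem' (fun c hcm hcmm => huniq c (List.mem_cons_of_mem _ hcm) hcmm)

-- no known apex ends with "." ++ (another) known apex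
theorem pvApex_pairwise :
    ∀ a ∈ pvKnownApexes, ∀ b ∈ pvKnownApexes, ¬ (('.' :: b.toList) <:+ a.toList) := by
  decide

-- anything matched is a suffix of the host
theorem pvMatches_suffix {h a : List Char} (hm : pvMatches h a) : a <:+ h := by
  rcases hm with rfl | hs
  · exact List.suffix_refl _
  · exact (List.suffix_cons '.' a).trans hs

-- at most one known apex matches a given host
theorem pvUnique (h : List Char) (a b : String)
    (ha : a ∈ pvKnownApexes) (hb : b ∈ pvKnownApexes)
    (hma : pvMatches h a.toList) (hmb : pvMatches h b.toList) : a = b := by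
  have hsa := pvMatches_suffix hma
  have hsb := pvMatches_suffix hmb
  have key : ∀ (x y : String), x ∈ pvKnownApexes → y ∈ pvKnownApexes →
      pvMatches h x.toList → pvMatches h y.toList →
      x.toList.length < y.toList.length → False := by
    intro x y hx hy hmx hmy hlt
    have hsy := pvMatches_suffix hmy
    rcases hmx with e | hdx
    · have hle := hsy.length_le
      rw [e] at hle
      omega
    · have hsfx : ('.' :: x.toList) <:+ y.toList :=
        List.suffix_of_suffix_length_le hdx hsy (by simp only [List.length_cons]; omega)
      exact pvApex_pairwise y hy x hx hsfx
  rcases Nat.lt_trichotomy a.toList.length b.toList.length with hlt | heq | hgt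
  · exact (key a b ha hb hma hmb hlt).elim
  · have : a.toList = b.toList :=
      List.IsSuffix.eq_of_length (List.suffix_of_suffix_length_le hsa hsb (le_of_eq heq)) heq
    exact String.ext_iff.2 this
  · exact (key b a hb ha hmb hma hgt).elim

-- B's loop step: the new candidate is the suffix after the FIRST dot, and it is dot-preceded in c
theorem pvDotStep (c : List Char) (hne : PySem.Chars.find c ['.'] ≠ -1) :
    PySem.Chars.slice c (some (PySem.Chars.find c ['.'] + 1)) none
        = c.drop ((PySem.Chars.find c ['.']).toNat + 1) ∧
    ('.' :: c.drop ((PySem.Chars.find c ['.']).toNat + 1)) <:+ c := by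
  have hinf : ['.'] <:+: c := (PySem.Chars.find_ne_neg_one_iff c ['.']).1 hne
  have hnn : (0:Int) ≤ PySem.Chars.find c ['.'] := (PySem.Chars.find_nonneg_iff c ['.']).2 hinf
  have hslice : PySem.Chars.slice c (some (PySem.Chars.find c ['.'] + 1)) none
      = c.drop ((PySem.Chars.find c ['.']).toNat + 1) := by
    rw [PySem.Chars.slice_eq_listSlice,
        PySem.List.slice_from c (by omega : (0:Int) ≤ PySem.Chars.find c ['.'] + 1)]
    congr 1
    omega
  refine ⟨hslice, ?_⟩
  obtain ⟨t, ht⟩ := (PySem.Chars.find_spec hnn).1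
  have htail : c.drop ((PySem.Chars.find c ['.']).toNat + 1)
      = (c.drop (PySem.Chars.find c ['.']).toNat).tail := by
    rw [← List.drop_drop]
    simp
  have h1 : c.drop ((PySem.Chars.find c ['.']).toNat + 1) = t := by
    rw [htail, ← ht]
    rfl
  rw [h1]
  have h2 : ('.' :: t) = c.drop (PySem.Chars.find c ['.']).toNat := by simpa using ht
  rw [h2]
  exact List.drop_suffix _ _

theorem pvContains_iff (h : List Char) :
    pvApexSet.contains (String.ofList h) = true ↔ String.ofList h ∈ pvKnownApexes := by
  rw [PySem.Set.contains_iff]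
  exact PySem.Set.mem_ofList pvKnownApexes (String.ofList h)

theorem pvScanB_eq_none (h : List Char)
    (hno : ∀ a ∈ pvKnownApexes, ¬ pvMatches h a.toList) : pvScanB h = none := by
  induction h using pvScanB.induct with
  | case1 c hc =>
    exact absurd (Or.inl (by simp)) (hno (String.ofList c) ((pvContains_iff c).1 hc))
  | case2 c hc i hi =>
    rw [pvScanB]
    simp only [hc]
    exact dif_pos hi
  | case3 c hc i hi ih =>
    rw [pvScanB]
    simp only [hc]
    rw [dif_neg hi]
    obtain ⟨hslice, hsuf⟩ := pvDotStep c hi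
    refine ih ?_
    intro a ha hm
    refine hno a ha ?_
    rw [hslice] at hm
    rcases hm with e | hs
    · exact Or.inr (e ▸ hsuf)
    · exact Or.inr (hs.trans ((List.suffix_cons '.' _).trans hsuf))

theorem pvScanB_eq_some (h : List Char) (a : String)
    (ha : a ∈ pvKnownApexes) (hm : pvMatches h a.toList) : pvScanB h = some a := by
  induction h using pvScanB.induct with
  | case1 c hc =>
    have hmem : String.ofList c ∈ pvKnownApexes := (pvContains_iff c).1 hc
    have he : String.ofList c = a :=
      pvUnique c (String.ofList c) a hmem ha (Or.inl (by simp)) hm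
    rw [pvScanB, if_pos hc, he]
  | case2 c hc i hi =>
    exfalso
    rcases hm with e | hs
    · have hmem : String.ofList c ∈ pvKnownApexes := by
        rw [e, String.ofList_toList]; exact ha
      exact hc ((pvContains_iff c).2 hmem)
    · have hinf : ['.'] <:+: c :=
        List.IsInfix.trans ⟨[], a.toList, rfl⟩ hs.isInfix
      exact (PySem.Chars.find_ne_neg_one_iff c ['.']).2 hinf hi
  | case3 c hc i hi ih =>
    rw [pvScanB]
    simp only [hc]
    rw [dif_neg hi]
    obtain ⟨hslice, hsuf⟩ := pvDotStep c hi
    have hinf : ['.'] <:+: c := (PySem.Chars.find_ne_neg_one_iff c ['.']).1 hi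
    have hnn : (0:Int) ≤ PySem.Chars.find c ['.'] := (PySem.Chars.find_nonneg_iff c ['.']).2 hinf
    have hs : ('.' :: a.toList) <:+ c := by
      rcases hm with e | hs
      · exfalso
        have hmem : String.ofList c ∈ pvKnownApexes := by
          rw [e, String.ofList_toList]; exact ha
        exact hc ((pvContains_iff c).2 hmem)
      · exact hs
    have hlen_d : (c.drop ((PySem.Chars.find c ['.']).toNat + 1)).length
        = c.length - ((PySem.Chars.find c ['.']).toNat + 1) := List.length_drop ..
    have hfirst : (PySem.Chars.find c ['.']).toNat < c.length := by
      have hp := (PySem.Chars.find_spec hnn).1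
      have := hp.length_le
      rw [List.length_drop] at this
      simp only [List.length_cons, List.length_nil] at this
      omega
    -- a's occurrence cannot start before the first dot, so |a| ≤ |new candidate|
    have hjle : a.toList.length ≤ (c.drop ((PySem.Chars.find c ['.']).toNat + 1)).length := by
      by_contra hgt
      obtain ⟨t, ht⟩ := hs
      have hlen : t.length + (a.toList.length + 1) = c.length := by
        have hlc := congrArg List.length ht
        rw [List.length_append, List.length_cons] at hlc
        omega
      have hdrop : c.drop t.length = '.' :: a.toList := by
        rw [← ht]
        exact List.drop_left
      have hmin := (PySem.Chars.find_spec hnn).2 t.length (by omega)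
      exact hmin (by rw [hdrop]; exact ⟨a.toList, rfl⟩)
    have hsub : ('.' :: a.toList) <:+ ('.' :: c.drop ((PySem.Chars.find c ['.']).toNat + 1)) :=
      List.suffix_of_suffix_length_le hs hsuf (by simp only [List.length_cons]; omega)
    have hmd : pvMatches (c.drop ((PySem.Chars.find c ['.']).toNat + 1)) a.toList := by
      rcases List.suffix_cons_iff.1 hsub with e | hsfx
      · injection e with _ h2
        exact Or.inl h2.symm
      · exact Or.inr hsfx
    exact ih (hslice ▸ hmd)

theorem pvMain (h : List Char) : pvLoopA (String.ofList h) pvKnownApexes = pvScanB h := by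
  by_cases hex : ∃ a ∈ pvKnownApexes, pvMatches h a.toList
  · obtain ⟨a, ha, hm⟩ := hex
    rw [pvLoopA_eq_some h _ a ha hm (fun b hb hmb => pvUnique h b a hb ha hmb hm),
        pvScanB_eq_some h a ha hm]
  · have hno : ∀ a ∈ pvKnownApexes, ¬ pvMatches h a.toList :=
      fun a ha hm => hex ⟨a, ha, hm⟩
    rw [pvLoopA_eq_none h _ hno, pvScanB_eq_none h hno]

-- ===== VERDICT (by name: the statement is the Claim_ definition above) =====
theorem apex_for_hostname_spec : Claim_equal_apex_for_hostname := by
  intro hostname _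
  unfold Spec_apex_for_hostname apex_for_hostname apex_for_hostname_alt
  simp only []
  split
  · rfl
  · rw [← pvMain]
    rw [String.ofList_toList]
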